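-- pv_equiv track=rewrite | github.com/pacifica/pacifica-metadata | metadata/rest/ingest.py | validate_mime_type
-- ===== SOURCE A (Python) =====
-- def validate_mime_type(mimetype):
--     """Validate the mimetype string."""
--     valid_prefixes = [
--         'application', 'audio', 'font', 'example', 'image',
--         'message', 'model', 'mulitpart', 'text', 'video'
--     ]
--     validated = False
--     for prefix in valid_prefixes:
--         if prefix + '/' == mimetype[:len(prefix) + 1]:
--             validated = True
--     return validated
-- ===== SOURCE B (Python) =====
-- _VALID_TOP_LEVEL = 'application audio font example image message model mulitpart text video'.split()
--
--
-- def validate_mime_type(mimetype):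
--     """Validate the mimetype string."""
--     head, sep, _tail = mimetype.partition('/')
--     return sep == '/' and head in _VALID_TOP_LEVEL
-- ===== Notes on version B (the rewrite author's own statement) =====
-- stated objective: simpler
-- what changed: Instead of looping over all ten prefixes and comparing each prefix-plus-slash against a slice of the input, B parses the mimetype once: it partitions it at the first slash and does a single membership test of the extracted top-level type against a word list built by splitting one literal (keeping the original typo mulitpart).
import Mathlib
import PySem

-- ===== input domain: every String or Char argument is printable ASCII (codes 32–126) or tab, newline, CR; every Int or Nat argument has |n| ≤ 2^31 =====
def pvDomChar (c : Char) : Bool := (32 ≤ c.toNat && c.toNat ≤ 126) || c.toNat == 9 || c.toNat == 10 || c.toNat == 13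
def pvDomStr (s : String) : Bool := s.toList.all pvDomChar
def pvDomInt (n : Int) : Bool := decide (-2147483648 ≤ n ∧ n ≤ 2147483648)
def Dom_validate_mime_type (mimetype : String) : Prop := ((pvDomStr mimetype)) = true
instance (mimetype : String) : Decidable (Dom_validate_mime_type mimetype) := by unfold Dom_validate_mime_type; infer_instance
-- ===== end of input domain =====

-- B replaces A's per-prefix slice-comparison loop by one parse: partition at the first slash,
-- then a single membership test in a word list split off one literal (simpler).

-- ===== PORT A =====
-- valid_prefixes = ['application', 'audio', ...]  (strings ported through List Char)
def pvPrefixes : List (List Char) :=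
  ["application".toList, "audio".toList, "font".toList, "example".toList, "image".toList,
   "message".toList, "model".toList, "mulitpart".toList, "text".toList, "video".toList]

def validate_mime_type (mimetype : String) : Bool :=
  -- for prefix in valid_prefixes: if prefix + '/' == mimetype[:len(prefix)+1]: validated = True
  pvPrefixes.foldl
    (fun validated pre =>
      if pre ++ ['/'] = PySem.List.slice mimetype.toList none (some ((pre.length : Int) + 1))
      then true else validated)
    false

-- ===== PORT B =====
-- _VALID_TOP_LEVEL = 'application audio … video'.split()
def pvValidTopLevel : List String :=
  PySem.Str.split₀ "application audio font example image message model mulitpart text video"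

-- hand-port of str.partition('/'), exact for the one-char separator: returns the head
-- (chars before the first '/') when '/' occurs, none when it does not (sep == '' there)
def pvPartitionHead : List Char → Option (List Char)
  | [] => none
  | c :: cs => if c = '/' then some [] else (pvPartitionHead cs).map (c :: ·)

def validate_mime_type_alt (mimetype : String) : Bool :=
  -- head, sep, _tail = mimetype.partition('/'); return sep == '/' and head in _VALID_TOP_LEVEL
  match pvPartitionHead mimetype.toList with
  | none => false
  | some head => pvValidTopLevel.contains (String.ofList head)

-- ===== PRECONDITION & SPEC =====
def Spec_validate_mime_type (mimetype : String) (out : Bool) : Prop := out = validate_mime_type_alt mimetype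
instance (mimetype : String) (out : Bool) : Decidable (Spec_validate_mime_type mimetype out) := by unfold Spec_validate_mime_type; infer_instance

-- ===== CLAIM (what is proved, stated in full; the proofs are below) =====
def Claim_equal_validate_mime_type : Prop := ∀ (mimetype : String), Dom_validate_mime_type mimetype → Spec_validate_mime_type mimetype (validate_mime_type mimetype)

-- ===== LEMMAS AND PROOFS =====

-- A's accumulator loop is an 'any' over the prefixes
theorem pv_foldl_if_true_eq_any {α : Type} (l : List α) (C : α → Prop) [DecidablePred C] (b : Bool) :
    l.foldl (fun v p => if C p then true else v) b = (b || l.any (fun p => decide (C p))) := by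
  induction l generalizing b with
  | nil => simp
  | cons x xs ih =>
      simp only [List.foldl_cons, List.any_cons]
      by_cases h : C x
      · rw [if_pos h, ih]; simp [h]
      · rw [if_neg h, ih]; simp [h]

-- B's partition helper, characterised: the text before the first '/', provided '/' occurs
theorem pv_partitionHead_eq (s : List Char) :
    pvPartitionHead s = if '/' ∈ s then some (s.takeWhile (fun c => c ≠ '/')) else none := by
  induction s with
  | nil => simp [pvPartitionHead]
  | cons a t ih =>
      by_cases ha : a = '/'
      · subst ha; simp [pvPartitionHead]
      · simp only [pvPartitionHead, if_neg ha, ih, List.takeWhile_cons]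
        by_cases hm : '/' ∈ t
        · simp [hm, ha]
        · simp [hm, List.mem_cons, ha, eq_comm]

-- a string containing '/' splits as (text before the first '/') ++ '/' ++ rest
theorem pv_split_at_slash (s : List Char) (h : '/' ∈ s) :
    s = s.takeWhile (fun c => c ≠ '/') ++ '/' :: (s.dropWhile (fun c => c ≠ '/')).tail := by
  induction s with
  | nil => cases h
  | cons a t ih =>
      by_cases ha : a = '/'
      · subst ha; simp
      · have ht : '/' ∈ t := by
          rcases List.mem_cons.mp h with h1 | h1
          · exact absurd h1.symm ha
          · exact h1
        simpa [List.takeWhile_cons, List.dropWhile_cons, ha] using ih ht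

-- core: for a slash-free prefix p, «p ++ "/" is a prefix of s» ↔ «text before the first '/' is p, and '/' occurs»
theorem pv_prefix_slash_iff (p s : List Char) (hp : '/' ∉ p) :
    p ++ ['/'] <+: s ↔ (s.takeWhile (fun c => c ≠ '/') = p ∧ '/' ∈ s) := by
  constructor
  · rintro ⟨t, rfl⟩
    refine ⟨?_, by simp⟩
    induction p with
    | nil => simp
    | cons a as ih =>
        have ha : a ≠ '/' := by intro h; exact hp (h ▸ List.mem_cons_self)
        have has : '/' ∉ as := fun h => hp (List.mem_cons_of_mem _ h)
        simpa [List.takeWhile_cons, ha] using ih has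
  · rintro ⟨htw, hmem⟩
    refine ⟨(s.dropWhile (fun c => c ≠ '/')).tail, ?_⟩
    conv_rhs => rw [pv_split_at_slash s hmem]
    rw [htw]
    simp

theorem validate_mime_type_eq (mimetype : String) :
    validate_mime_type mimetype = validate_mime_type_alt mimetype := by
  unfold validate_mime_type validate_mime_type_alt
  rw [pv_foldl_if_true_eq_any]
  simp only [Bool.false_or]
  have hkey : ∀ (p : List Char), '/' ∉ p →
      (decide (p ++ ['/'] = PySem.List.slice mimetype.toList none (some ((p.length : Int) + 1))))
        = (decide (mimetype.toList.takeWhile (fun c => c ≠ '/') = p) && decide ('/' ∈ mimetype.toList)) := by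
    intro p hp
    have hc : ((p.length : Int) + 1) = ((p.length + 1 : Nat) : Int) := by push_cast; ring
    rw [hc, PySem.List.slice_to_natCast]
    have hiff : (p ++ ['/'] = mimetype.toList.take (p.length + 1)) ↔
        (mimetype.toList.takeWhile (fun c => c ≠ '/') = p ∧ '/' ∈ mimetype.toList) := by
      rw [← pv_prefix_slash_iff p mimetype.toList hp]
      have hlen : (p ++ ['/']).length = p.length + 1 := by simp
      rw [List.prefix_iff_eq_take, hlen]
    simp [hiff]
  rw [pv_partitionHead_eq]
  by_cases hmem : '/' ∈ mimetype.toList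
  · simp only [hmem, if_pos]
    unfold pvPrefixes
    simp only [List.any_cons, List.any_nil]
    rw [hkey _ (by decide), hkey _ (by decide), hkey _ (by decide), hkey _ (by decide),
        hkey _ (by decide), hkey _ (by decide), hkey _ (by decide), hkey _ (by decide),
        hkey _ (by decide), hkey _ (by decide)]
    have hlist : pvValidTopLevel = ["application", "audio", "font", "example", "image",
        "message", "model", "mulitpart", "text", "video"] := by decide
    rw [hlist]
    simp only [List.contains_cons, List.contains_nil]
    have hmk : ∀ (t : String), ((String.ofList (mimetype.toList.takeWhile (fun c => c ≠ '/'))) == t)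
        = decide (mimetype.toList.takeWhile (fun c => c ≠ '/') = t.toList) := by
      intro t
      rw [Bool.eq_iff_iff]
      simp [String.ext_iff]
    rw [hmk, hmk, hmk, hmk, hmk, hmk, hmk, hmk, hmk, hmk]
    simp [hmem, Bool.or_false]
  · simp only [hmem, if_false]
    rw [List.any_eq_false]
    intro x hx
    have hx' : '/' ∉ x := by fin_cases hx <;> decide
    have h := hkey x hx'
    simp only [decide_eq_false_iff_not.mpr hmem, Bool.and_false, decide_eq_false_iff_not] at h
    simpa using h

-- ===== VERDICT (by name: the statement is the Claim_ definition above) =====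
theorem validate_mime_type_spec : Claim_equal_validate_mime_type := by
  intro mimetype _
  unfold Spec_validate_mime_type
  exact validate_mime_type_eq mimetype
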